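-- pv_equiv track=rewrite | github.com/sasha01zuev/VazonezArbitrageBot | handlers/users/settings/blacklist_coins.py | format_blacklist_message
-- ===== SOURCE A (Python) =====
-- TELEGRAM_MESSAGE_LIMIT = 4096
--
-- ELLIPSIS = "..."
--
-- def format_blacklist_message(blacklist_coins: list[str], header_text: str) -> str:
--     header = header_text
--     base_length = len(header)
--     coins_text = ""
--     total_length = base_length
--
--     for i, coin in enumerate(blacklist_coins):
--         # добавляем запятую и пробел, если это не первая монета
--         separator = ", " if i > 0 else ""
--         part = f"<b>{separator}{coin}</b>"
--         new_length = total_length + len(part)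
--
--         # если следующая монета не влезает — добавляем многоточие и выходим
--         if new_length + len(ELLIPSIS) > TELEGRAM_MESSAGE_LIMIT:
--             coins_text += ELLIPSIS
--             break
--
--         coins_text += part
--         total_length = new_length
--
--     return header + coins_text
-- ===== SOURCE B (Python) =====
-- TELEGRAM_MESSAGE_LIMIT = 4096
--
-- ELLIPSIS = "..."
--
-- def format_blacklist_message(blacklist_coins: list[str], header_text: str) -> str:
--     # Different algorithm: build the formatted parts together with the prefix sums of
--     # their lengths, then BINARY SEARCH the (nondecreasing) prefix-sum array for the
--     # number of parts that fit within the limit with ellipsis room reserved, and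
--     # assemble the message with one slice + join.  Correct because part lengths are
--     # nonnegative, so "prefix[k] <= budget" is a monotone predicate in k and the
--     # greedy cutoff equals the bisection point.
--     parts = []
--     prefix = []  # prefix[k] = len(parts[0]) + ... + len(parts[k])
--     acc = 0
--     for i, coin in enumerate(blacklist_coins):
--         part = f"<b>{', ' if i else ''}{coin}</b>"
--         parts.append(part)
--         acc += len(part)
--         prefix.append(acc)
--     budget = TELEGRAM_MESSAGE_LIMIT - len(header_text) - len(ELLIPSIS)
--     lo, hi = 0, len(prefix)
--     while lo < hi:
--         mid = (lo + hi) // 2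
--         if prefix[mid] <= budget:
--             lo = mid + 1
--         else:
--             hi = mid
--     kept = lo
--     if kept == len(parts):
--         return header_text + "".join(parts)
--     return header_text + "".join(parts[:kept]) + ELLIPSIS
-- ===== Notes on version B (the rewrite author's own statement) =====
-- stated objective: alternative
-- what changed: Replaces A's fused greedy loop (format, track running length, accumulate text, break with ellipsis) by a prefix-sum + binary-search algorithm: one pass builds the formatted parts and the prefix sums of their lengths, a hand-written bisection on the monotone prefix-sum array finds how many parts fit (reserving ellipsis room), and the message is assembled with one slice and join.
import Mathlib
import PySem

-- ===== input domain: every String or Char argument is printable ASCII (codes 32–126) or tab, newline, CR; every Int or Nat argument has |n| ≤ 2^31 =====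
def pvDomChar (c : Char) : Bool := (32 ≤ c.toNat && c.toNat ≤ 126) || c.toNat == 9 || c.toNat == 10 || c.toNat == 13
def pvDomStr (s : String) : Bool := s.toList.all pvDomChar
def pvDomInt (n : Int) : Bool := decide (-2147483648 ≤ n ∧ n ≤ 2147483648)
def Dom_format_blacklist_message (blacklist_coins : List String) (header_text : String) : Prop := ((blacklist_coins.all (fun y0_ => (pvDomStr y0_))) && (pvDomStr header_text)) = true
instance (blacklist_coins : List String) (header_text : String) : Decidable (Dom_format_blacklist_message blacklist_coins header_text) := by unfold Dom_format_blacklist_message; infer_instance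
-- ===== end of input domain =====

-- B replaces A's fused greedy loop by pre sums of part lengths plus a hand-written binary
-- search for the cutoff; objective: alternative algorithm, same overall cost.

def pvTELEGRAM_MESSAGE_LIMIT : Int := 4096

def pvELLIPSIS : String := "..."

-- ===== PORT A =====
-- A's for-loop over enumerate(blacklist_coins), accumulating coins_text and total_length
def fmtA_loop : List (Int × String) → String → Int → String
  | [], coins_text, _ => coins_text
  | (i, coin) :: rest, coins_text, total_length =>
    let separator := if i > 0 then ", " else ""
    let part := "<b>" ++ separator ++ coin ++ "</b>"
    let new_length := total_length + PySem.Str.len part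
    if new_length + PySem.Str.len pvELLIPSIS > pvTELEGRAM_MESSAGE_LIMIT then
      coins_text ++ pvELLIPSIS
    else
      fmtA_loop rest (coins_text ++ part) new_length

def format_blacklist_message (blacklist_coins : List String) (header_text : String) : String :=
  header_text ++ fmtA_loop (PySem.List.enumerate blacklist_coins) "" (PySem.Str.len header_text)

-- ===== PORT B =====
-- B's build loop: parts, pre sums of their lengths, running acc
def fmtB_build : List (Int × String) → List String → List Int → Int → List String × List Int
  | [], parts, pre, _ => (parts, pre)
  | (i, coin) :: rest, parts, pre, acc =>
    let part := "<b>" ++ (if i > 0 then ", " else "") ++ coin ++ "</b>"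
    fmtB_build rest (parts ++ [part]) (pre ++ [acc + PySem.Str.len part]) (acc + PySem.Str.len part)

-- B's while-loop binary search; pre[mid] is always in range (lo < hi ≤ len), so getD is exact
def fmtB_bsearch (pre : List Int) (budget : Int) (lo hi : Nat) : Nat :=
  if _h : lo < hi then
    let mid := (lo + hi) / 2
    if pre.getD mid 0 ≤ budget then fmtB_bsearch pre budget (mid + 1) hi
    else fmtB_bsearch pre budget lo mid
  else lo
termination_by hi - lo
decreasing_by all_goals omega

def format_blacklist_message_alt (blacklist_coins : List String) (header_text : String) : String :=
  let pp := fmtB_build (PySem.List.enumerate blacklist_coins) [] [] 0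
  let budget := pvTELEGRAM_MESSAGE_LIMIT - PySem.Str.len header_text - PySem.Str.len pvELLIPSIS
  let kept := fmtB_bsearch pp.2 budget 0 pp.2.length
  if kept = pp.1.length then header_text ++ PySem.Str.join "" pp.1
  else header_text ++ PySem.Str.join "" (pp.1.take kept) ++ pvELLIPSIS

-- ===== PRECONDITION & SPEC =====
def Spec_format_blacklist_message (blacklist_coins : List String) (header_text : String) (out : String) : Prop := out = format_blacklist_message_alt blacklist_coins header_text
instance (blacklist_coins : List String) (header_text : String) (out : String) : Decidable (Spec_format_blacklist_message blacklist_coins header_text out) := by unfold Spec_format_blacklist_message; infer_instance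

-- ===== CLAIM (what is proved, stated in full; the proofs are below) =====
def Claim_equal_format_blacklist_message : Prop := ∀ (blacklist_coins : List String) (header_text : String), Dom_format_blacklist_message blacklist_coins header_text → Spec_format_blacklist_message blacklist_coins header_text (format_blacklist_message blacklist_coins header_text)

-- ===== LEMMAS AND PROOFS =====

-- proof-side abstractions
def fmtB_part (p : Int × String) : String :=
  "<b>" ++ (if p.1 > 0 then ", " else "") ++ p.2 ++ "</b>"

-- greedy kept-count of A's loop, used as the bridge between the two algorithms
def fmtA_count : List String → Int → Nat
  | [], _ => 0
  | part :: rest, total =>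
    if total + PySem.Str.len part + PySem.Str.len pvELLIPSIS > pvTELEGRAM_MESSAGE_LIMIT then 0
    else fmtA_count rest (total + PySem.Str.len part) + 1

-- pre sums with a running base
def psums : Int → List Int → List Int
  | _, [] => []
  | a, x :: xs => (a + x) :: psums (a + x) xs

lemma str_join_empty_cons (p : String) (ps : List String) :
    PySem.Str.join "" (p :: ps) = p ++ PySem.Str.join "" ps := by
  rw [← String.toList_inj]
  cases ps with
  | nil => simp [PySem.Str.toList_join, PySem.Chars.join_singleton, PySem.Chars.join_nil]
  | cons q qs => simp [PySem.Str.toList_join, PySem.Chars.join_cons_cons]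

-- A's loop only ever appends to coins_text: pull the accumulator out front
lemma fmtA_loop_acc (l : List (Int × String)) : ∀ (c : String) (t : Int),
    fmtA_loop l c t = c ++ fmtA_loop l "" t := by
  induction l with
  | nil => intro c t; simp [fmtA_loop]
  | cons x rest ih =>
      intro c t
      obtain ⟨i, coin⟩ := x
      simp only [fmtA_loop]
      split_ifs
      · simp
      · rw [ih]
        conv_rhs => rw [ih]
        simp [String.append_assoc]
      · simp
      · rw [ih]
        conv_rhs => rw [ih]
        simp [String.append_assoc]

-- A's fused loop = count-then-slice-then-join over the mapped parts
lemma loop_eq (l : List (Int × String)) : ∀ (t : Int),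
    fmtA_loop l "" t =
      (if fmtA_count (l.map fmtB_part) t = (l.map fmtB_part).length
       then PySem.Str.join "" (l.map fmtB_part)
       else PySem.Str.join "" ((l.map fmtB_part).take (fmtA_count (l.map fmtB_part) t)) ++ pvELLIPSIS) := by
  induction l with
  | nil =>
      intro t
      simp [fmtA_loop, fmtA_count, PySem.Str.join, PySem.Chars.join, List.intercalate]
  | cons x rest ih =>
      intro t
      obtain ⟨i, coin⟩ := x
      have hpart : ("<b>" ++ (if i > 0 then ", " else "") ++ coin ++ "</b>") = fmtB_part (i, coin) := rfl
      simp only [fmtA_loop, List.map_cons]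
      rw [hpart]
      by_cases h : t + PySem.Str.len (fmtB_part (i, coin)) + PySem.Str.len pvELLIPSIS > pvTELEGRAM_MESSAGE_LIMIT
      · simp only [fmtA_count, if_pos h]
        rw [if_neg (by simp)]
        simp [PySem.Str.join, PySem.Chars.join, List.intercalate]
      · simp only [fmtA_count, if_neg h]
        rw [fmtA_loop_acc, ih]
        by_cases hk : fmtA_count (List.map fmtB_part rest) (t + PySem.Str.len (fmtB_part (i, coin))) = (List.map fmtB_part rest).length
        · rw [if_pos hk, if_pos (by rw [List.length_map] at hk; simpa [PySem.Str.len_eq] using hk), str_join_empty_cons]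
          simp
        · rw [if_neg hk, if_neg (by rw [List.length_map] at hk; simpa [PySem.Str.len_eq] using hk), List.take_succ_cons, str_join_empty_cons]
          simp [String.append_assoc]

-- B's build loop computes the mapped parts and the pre sums of their lengths
lemma build_eq (l : List (Int × String)) : ∀ (P : List String) (Q : List Int) (a : Int),
    fmtB_build l P Q a = (P ++ l.map fmtB_part, Q ++ psums a (l.map (fun p => PySem.Str.len (fmtB_part p)))) := by
  induction l with
  | nil => intro P Q a; simp [fmtB_build, psums]
  | cons x rest ih =>
      intro P Q a
      obtain ⟨i, coin⟩ := x
      simp only [fmtB_build, List.map_cons, psums, ih, fmtB_part]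
      simp

lemma psums_length (a : Int) (ls : List Int) : (psums a ls).length = ls.length := by
  induction ls generalizing a with
  | nil => simp [psums]
  | cons x xs ih => simp [psums, ih]

-- every entry of psums a ls is ≥ a when all entries of ls are nonnegative
lemma psums_ge (ls : List Int) : ∀ (a : Int), (∀ y ∈ ls, 0 ≤ y) → ∀ x ∈ psums a ls, a ≤ x := by
  induction ls with
  | nil => intro a _ x hx; simp [psums] at hx
  | cons y ys ih =>
      intro a hnn x hx
      simp only [psums, List.mem_cons] at hx
      rcases hx with h | h
      · have := hnn y (by simp); omega
      · have := ih (a + y) (fun z hz => hnn z (by simp [hz])) x h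
        have := hnn y (by simp); omega

-- the greedy count characterises membership in the pre-sum array relative to the limit
lemma count_char (ps : List String) : ∀ (t : Int),
    fmtA_count ps t ≤ ps.length ∧
    (∀ i, i < fmtA_count ps t →
      (psums t (ps.map PySem.Str.len)).getD i 0 + PySem.Str.len pvELLIPSIS ≤ pvTELEGRAM_MESSAGE_LIMIT) ∧
    (∀ i, fmtA_count ps t ≤ i → i < ps.length →
      ¬ ((psums t (ps.map PySem.Str.len)).getD i 0 + PySem.Str.len pvELLIPSIS ≤ pvTELEGRAM_MESSAGE_LIMIT)) := by
  induction ps with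
  | nil => intro t; refine ⟨by simp [fmtA_count], by simp [fmtA_count], by simp⟩
  | cons p rest ih =>
      intro t
      by_cases h : t + PySem.Str.len p + PySem.Str.len pvELLIPSIS > pvTELEGRAM_MESSAGE_LIMIT
      · refine ⟨by simp only [fmtA_count, if_pos h]; simp,
          by simp only [fmtA_count, if_pos h]; intro i hi; omega, ?_⟩
        intro i _ hi
        match i with
        | 0 =>
            simp only [List.map_cons, psums, List.getD_cons_zero]
            omega
        | Nat.succ j =>
            simp only [List.map_cons, psums, List.getD_cons_succ]
            have hlen : j < (psums (t + PySem.Str.len p) (rest.map PySem.Str.len)).length := by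
              rw [psums_length]; simp at hi ⊢; omega
            have hmem : (psums (t + PySem.Str.len p) (rest.map PySem.Str.len)).getD j 0 ∈
                psums (t + PySem.Str.len p) (rest.map PySem.Str.len) := by
              rw [List.getD_eq_getElem _ _ hlen]; exact List.getElem_mem hlen
            have hge := psums_ge (rest.map PySem.Str.len) (t + PySem.Str.len p)
              (by intro y hy; simp only [List.mem_map] at hy; obtain ⟨s, _, rfl⟩ := hy
                  simp [PySem.Str.len_eq]) _ hmem
            omega
      · obtain ⟨ih1, ih2, ih3⟩ := ih (t + PySem.Str.len p)
        refine ⟨by simp only [fmtA_count, if_neg h, List.length_cons]; omega, ?_, ?_⟩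
        · intro i hi
          simp only [fmtA_count, if_neg h] at hi
          match i with
          | 0 =>
              simp only [List.map_cons, psums, List.getD_cons_zero]
              omega
          | Nat.succ j =>
              simp only [List.map_cons, psums, List.getD_cons_succ]
              exact ih2 j (by omega)
        · intro i hi hilen
          simp only [fmtA_count, if_neg h] at hi
          match i with
          | 0 => omega
          | Nat.succ j =>
              simp only [List.map_cons, psums, List.getD_cons_succ]
              exact ih3 j (by omega) (by simpa using hilen)

-- psums with base a is psums with base b shifted by (a - b); only the a↔0 instance is needed
lemma psums_shift (ls : List Int) : ∀ (a : Int),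
    psums a ls = (psums 0 ls).map (fun x => x + a) := by
  induction ls with
  | nil => intro a; simp [psums]
  | cons x xs ih =>
      intro a
      simp only [psums, List.map_cons, List.cons.injEq]
      refine ⟨by omega, ?_⟩
      rw [ih (a + x), ih (0 + x), List.map_map]
      congr 1
      funext y
      simp only [Function.comp_apply]
      omega

lemma getD_map_add (l : List Int) (t : Int) (i : Nat) (h : i < l.length) :
    (l.map (fun x => x + t)).getD i 0 = l.getD i 0 + t := by
  rw [List.getD_eq_getElem _ _ (by simpa using h), List.getD_eq_getElem _ _ h, List.getElem_map]

-- the hand-written binary search finds any index c with the ≤/¬≤ split property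
lemma bsearch_eq (pre : List Int) (budget : Int) (c : Nat)
    (_hc : c ≤ pre.length)
    (h1 : ∀ i, i < c → pre.getD i 0 ≤ budget)
    (h2 : ∀ i, c ≤ i → i < pre.length → ¬ pre.getD i 0 ≤ budget) :
    ∀ (d lo hi : Nat), hi - lo ≤ d → lo ≤ c → c ≤ hi → hi ≤ pre.length →
      fmtB_bsearch pre budget lo hi = c := by
  intro d
  induction d with
  | zero =>
      intro lo hi hd hlo hhi _
      rw [fmtB_bsearch, dif_neg (by omega)]
      omega
  | succ d ih =>
      intro lo hi hd hlo hhi hlen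
      by_cases hlt : lo < hi
      · rw [fmtB_bsearch, dif_pos hlt]
        simp only
        by_cases hmid : pre.getD ((lo + hi) / 2) 0 ≤ budget
        · rw [if_pos hmid]
          have : (lo + hi) / 2 < c := by
            by_contra hcon
            exact h2 _ (by omega) (by omega) hmid
          exact ih ((lo + hi) / 2 + 1) hi (by omega) (by omega) hhi hlen
        · rw [if_neg hmid]
          have : c ≤ (lo + hi) / 2 := by
            by_contra hcon
            exact hmid (h1 _ (by omega))
          exact ih lo ((lo + hi) / 2) (by omega) hlo this (by omega)
      · rw [fmtB_bsearch, dif_neg hlt]; omega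

-- ===== VERDICT (by name: the statement is the Claim_ definition above) =====
theorem format_blacklist_message_spec : Claim_equal_format_blacklist_message := by
  intro coins header _
  unfold Spec_format_blacklist_message format_blacklist_message format_blacklist_message_alt
  set l := PySem.List.enumerate coins with hl
  set t := PySem.Str.len header with ht
  set parts := l.map fmtB_part with hparts
  set lens := parts.map PySem.Str.len with hlens
  have hbuild : fmtB_build l [] [] 0 = (parts, psums 0 lens) := by
    rw [build_eq]
    simp only [List.nil_append, hlens, hparts, List.map_map]
    rfl
  rw [hbuild]
  simp only
  set c := fmtA_count parts t with hc
  obtain ⟨h1, h2, h3⟩ := count_char parts t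
  have hplen : (psums 0 lens).length = parts.length := by
    rw [psums_length]; simp [hlens]
  have hshift : psums t lens = (psums 0 lens).map (fun x => x + t) := psums_shift lens t
  have hb : fmtB_bsearch (psums 0 lens) (pvTELEGRAM_MESSAGE_LIMIT - t - PySem.Str.len pvELLIPSIS)
      0 (psums 0 lens).length = c := by
    apply bsearch_eq (psums 0 lens) _ c (by omega)
      (d := (psums 0 lens).length) (lo := 0) (hi := (psums 0 lens).length)
    · intro i hi
      have := h2 i hi
      rw [← hlens] at this
      rw [hshift, getD_map_add _ _ _ (by omega)] at this
      omega
    · intro i hic hilen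
      have := h3 i hic (by omega)
      rw [← hlens] at this
      intro hle
      apply this
      rw [hshift, getD_map_add _ _ _ (by omega)]
      omega
    all_goals omega
  rw [hb, loop_eq, ← hparts, ← hc]
  by_cases hce : c = parts.length
  · rw [if_pos hce, if_pos hce]
  · rw [if_neg hce, if_neg hce, String.append_assoc]
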